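-- pv_equiv track=rewrite | github.com/adduswag/playfair | main.py | remove_inserted_x
-- ===== SOURCE A (Python) =====
-- def remove_inserted_x(text):
--     result = ""
--     i = 0
--     while i < len(text):
--         if i < len(text) - 2 and text[i] == text[i+2] and text[i+1] == 'X':
--             result += text[i]
--             i += 2
--         else:
--             result += text[i]
--         i += 1
--
--     if result.endswith('X'):
--         result = result[:-1]
--
--     return result
-- ===== SOURCE B (Python) =====
-- import re
--
-- def remove_inserted_x(text):
--     result = re.sub(r'(.)X\1', r'\1', text, flags=re.DOTALL)
--     if result.endswith('X'):
--         result = result[:-1]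
--     return result
-- ===== Notes on version B (the rewrite author's own statement) =====
-- stated objective: faster
-- what changed: Replaced the explicit index-arithmetic while-loop with per-character string concatenation by a single regex substitution r'(.)X\1' -> r'\1' (DOTALL), whose left-to-right non-overlapping scan matches A's traversal; trailing-X strip kept as a post-step.
import Mathlib
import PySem

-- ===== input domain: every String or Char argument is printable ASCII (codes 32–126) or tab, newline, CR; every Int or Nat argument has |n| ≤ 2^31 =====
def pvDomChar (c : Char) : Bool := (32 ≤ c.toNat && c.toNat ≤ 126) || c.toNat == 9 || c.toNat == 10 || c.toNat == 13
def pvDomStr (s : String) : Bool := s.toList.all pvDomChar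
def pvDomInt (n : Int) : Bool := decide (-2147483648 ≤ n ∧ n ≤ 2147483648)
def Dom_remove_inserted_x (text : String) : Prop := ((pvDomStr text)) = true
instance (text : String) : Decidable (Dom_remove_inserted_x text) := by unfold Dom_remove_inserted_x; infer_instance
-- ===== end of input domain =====

-- B replaces A's index-arithmetic while-loop by a single regex substitution r'(.)X\1' -> r'\1' (DOTALL); same result, idiomatic.

-- ===== PORT A =====
-- the while-loop: index i, accumulated result
def removeXLoopA (cs : List Char) (i : Nat) (result : List Char) : List Char :=
  if i < cs.length then
    if i + 2 < cs.length ∧ cs[i]?.getD ' ' = cs[i+2]?.getD ' ' ∧ cs[i+1]?.getD ' ' = 'X' then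
      removeXLoopA cs (i + 3) (result ++ [cs[i]?.getD ' '])   -- result += text[i]; i += 2; i += 1
    else
      removeXLoopA cs (i + 1) (result ++ [cs[i]?.getD ' '])   -- result += text[i]; i += 1
  else result
termination_by cs.length - i

def remove_inserted_x (text : String) : String :=
  let r := removeXLoopA text.toList 0 []
  String.ofList (if r.getLast? = some 'X' then r.dropLast else r)  -- if result.endswith('X'): result = result[:-1]

-- ===== PORT B =====
-- hand port (exact) of re.sub(r'(.)X\1', r'\1', text, flags=re.DOTALL): the regex engine's
-- left-to-right non-overlapping scan; '.' matches any char (DOTALL), \1 backreference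
def pvReSubXX : List Char → List Char
  | a :: b :: c :: rest => if b = 'X' ∧ a = c then a :: pvReSubXX rest else a :: pvReSubXX (b :: c :: rest)
  | a :: rest => a :: pvReSubXX rest
  | [] => []
termination_by l => l.length

def remove_inserted_x_alt (text : String) : String :=
  let r := pvReSubXX text.toList
  String.ofList (if r.getLast? = some 'X' then r.dropLast else r)  -- if result.endswith('X'): result = result[:-1]

-- ===== PRECONDITION & SPEC =====
def Spec_remove_inserted_x (text : String) (out : String) : Prop := out = remove_inserted_x_alt text
instance (text : String) (out : String) : Decidable (Spec_remove_inserted_x text out) := by unfold Spec_remove_inserted_x; infer_instance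

-- ===== CLAIM (what is proved, stated in full; the proofs are below) =====
def Claim_equal_remove_inserted_x : Prop := ∀ (text : String), Dom_remove_inserted_x text → Spec_remove_inserted_x text (remove_inserted_x text)

-- ===== LEMMAS AND PROOFS =====

theorem pvReSubXX_match (a : Char) (rest : List Char) :
    pvReSubXX (a :: 'X' :: a :: rest) = a :: pvReSubXX rest := by
  simp [pvReSubXX]

theorem pvReSubXX_skip (a b c : Char) (rest : List Char) (h : ¬ (b = 'X' ∧ a = c)) :
    pvReSubXX (a :: b :: c :: rest) = a :: pvReSubXX (b :: c :: rest) := by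
  rw [pvReSubXX, if_neg h]

theorem removeXLoopA_eq (n : Nat) : ∀ (cs : List Char) (i : Nat) (acc : List Char),
    cs.length - i ≤ n → removeXLoopA cs i acc = acc ++ pvReSubXX (cs.drop i) := by
  induction n with
  | zero =>
    intro cs i acc h
    have hle : cs.length ≤ i := by omega
    rw [removeXLoopA]
    simp [List.drop_eq_nil_of_le hle, pvReSubXX, Nat.not_lt.mpr hle]
  | succ n ih =>
    intro cs i acc h
    rw [removeXLoopA]
    by_cases hi : i < cs.length
    · simp only [hi, if_true]
      have hd1 : cs.drop i = cs[i] :: cs.drop (i+1) := List.drop_eq_getElem_cons hi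
      by_cases hc : i + 2 < cs.length ∧ cs[i]?.getD ' ' = cs[i+2]?.getD ' ' ∧ cs[i+1]?.getD ' ' = 'X'
      · obtain ⟨h2, heq, hx⟩ := hc
        have h1 : i + 1 < cs.length := by omega
        have hd2 : cs.drop (i+1) = cs[i+1] :: cs.drop (i+2) := List.drop_eq_getElem_cons h1
        have hd3 : cs.drop (i+2) = cs[i+2] :: cs.drop (i+3) := List.drop_eq_getElem_cons h2
        simp only [List.getElem?_eq_getElem, hi, h1, h2, Option.getD_some] at heq hx
        rw [if_pos ⟨h2, by simp [hi, h2, heq], by simp [h1, hx]⟩,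
          List.getElem?_eq_getElem hi, Option.getD_some,
          ih cs (i+3) (acc ++ [cs[i]]) (by omega), hd1, hd2, hd3, hx, ← heq,
          pvReSubXX_match]
        simp
      · simp only [hc, if_false]
        rw [ih cs (i+1) (acc ++ [cs[i]?.getD ' ']) (by omega), hd1,
          List.getElem?_eq_getElem hi, Option.getD_some]
        by_cases h2 : i + 2 < cs.length
        · have h1 : i + 1 < cs.length := by omega
          have hd2 : cs.drop (i+1) = cs[i+1] :: cs.drop (i+2) := List.drop_eq_getElem_cons h1
          have hd3 : cs.drop (i+2) = cs[i+2] :: cs.drop (i+3) := List.drop_eq_getElem_cons h2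
          simp only [List.getElem?_eq_getElem, hi, h1, h2, Option.getD_some] at hc
          have hne : ¬ (cs[i+1] = 'X' ∧ cs[i] = cs[i+2]) := by tauto
          rw [hd2, hd3, pvReSubXX_skip _ _ _ _ hne, ← hd3, ← hd2]
          simp
        · -- cs.drop (i+1) has at most one element
          have hlen : (cs.drop (i+1)).length ≤ 1 := by simp [List.length_drop]; omega
          rcases hshape : cs.drop (i+1) with _ | ⟨b, _ | ⟨c, rest⟩⟩
          · simp [pvReSubXX]
          · simp [pvReSubXX]
          · rw [hshape] at hlen; simp at hlen
    · simp only [hi, if_false]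
      have hle : cs.length ≤ i := by omega
      simp [List.drop_eq_nil_of_le hle, pvReSubXX]

theorem loopA_eq_reSub (cs : List Char) : removeXLoopA cs 0 [] = pvReSubXX cs := by
  simpa using removeXLoopA_eq cs.length cs 0 [] (by omega)

-- ===== VERDICT (by name: the statement is the Claim_ definition above) =====
theorem remove_inserted_x_spec : Claim_equal_remove_inserted_x := by
  intro text _
  unfold Spec_remove_inserted_x remove_inserted_x remove_inserted_x_alt
  rw [loopA_eq_reSub]
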